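-- pv_equiv track=rewrite | github.com/NetSP-KAIST/shield | cerberus/control-plane/python/run_cp_scapy.py | calc_overflow_table
-- ===== SOURCE A (Python) =====
-- def calc_overflow_table(new_slice):
--     flood_flags = []
--     total_bits = sum(new_slice)
--     current_bit = total_bits
--
--     for bits in new_slice:
--         current_bit -= bits
--         flood_flag = 1 << (current_bit + bits - 1)
--         flood_flags.append(flood_flag)
--
--     return flood_flags
-- ===== SOURCE B (Python) =====
-- def calc_overflow_table(new_slice):
--     # two-pass: build the suffix sums, then map each to its flag bit
--     suffix = []
--     s = 0
--     for bits in reversed(new_slice):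
--         s += bits
--         suffix.append(s)
--     suffix.reverse()
--     return [1 << (s - 1) for s in suffix]
-- ===== Notes on version B (the rewrite author's own statement) =====
-- stated objective: simpler
-- what changed: Replaces A's single forward-subtraction accumulator (total minus running prefix) with an explicit suffix-sum table built backwards and a final comprehension mapping each suffix sum s to 1 << (s - 1).
import Mathlib
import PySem

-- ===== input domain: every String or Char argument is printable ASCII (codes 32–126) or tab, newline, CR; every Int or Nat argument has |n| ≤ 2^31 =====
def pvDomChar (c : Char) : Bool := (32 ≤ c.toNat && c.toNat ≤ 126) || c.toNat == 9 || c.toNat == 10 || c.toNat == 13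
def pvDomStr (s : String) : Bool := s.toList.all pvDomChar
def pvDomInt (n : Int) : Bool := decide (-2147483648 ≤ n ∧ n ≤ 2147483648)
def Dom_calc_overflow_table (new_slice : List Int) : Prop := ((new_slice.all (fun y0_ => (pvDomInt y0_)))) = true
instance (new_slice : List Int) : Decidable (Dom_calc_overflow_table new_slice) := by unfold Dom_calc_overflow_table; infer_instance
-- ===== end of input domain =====

-- B builds the suffix-sum table explicitly and maps 1 << (s-1) over it, instead of A's
-- forward-subtraction accumulator; objective: simpler (same O(n) cost).


-- ===== PORT A =====
-- Python's `1 << e` for e ≥ 0 is 2 ^ e; Pre_ guarantees every exponent is ≥ 0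
-- (Python raises ValueError on a negative shift count, and those inputs are excluded).
def calc_overflow_table (new_slice : List Int) : List Int :=
  let total_bits : Int := new_slice.sum
  (new_slice.foldl
    (fun (st : Int × List Int) bits =>
      let current_bit := st.1 - bits
      (current_bit, st.2 ++ [2 ^ (current_bit + bits - 1).toNat]))
    (total_bits, [])).2

-- ===== PORT B =====
def calc_overflow_table_alt (new_slice : List Int) : List Int :=
  let suffix :=
    (new_slice.reverse.foldl
      (fun (p : Int × List Int) bits => (p.1 + bits, p.2 ++ [p.1 + bits]))
      (0, [])).2.reverse
  suffix.map (fun s => 2 ^ (s - 1).toNat)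

-- ===== PRECONDITION & SPEC =====
-- Pre_ excludes exactly the inputs on which Python A raises ValueError (negative shift
-- count): those where some suffix sum of new_slice is ≤ 0.
def Pre_calc_overflow_table (new_slice : List Int) : Prop :=
  ∀ i ∈ List.range new_slice.length, 1 ≤ (new_slice.drop i).sum
instance (new_slice : List Int) : Decidable (Pre_calc_overflow_table new_slice) := by
  unfold Pre_calc_overflow_table; infer_instance
def pvWitness_calc_overflow_table : List Int := [2, 3, 1]

def Spec_calc_overflow_table (new_slice : List Int) (out : List Int) : Prop := out = calc_overflow_table_alt new_slice
instance (new_slice : List Int) (out : List Int) : Decidable (Spec_calc_overflow_table new_slice out) := by unfold Spec_calc_overflow_table; infer_instance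

-- ===== CLAIM (what is proved, stated in full; the proofs are below) =====
def Claim_equal_calc_overflow_table : Prop := ∀ (new_slice : List Int), Dom_calc_overflow_table new_slice → Pre_calc_overflow_table new_slice → Spec_calc_overflow_table new_slice (calc_overflow_table new_slice)

-- ===== LEMMAS AND PROOFS =====

-- the list of A's running states: total, total - a₀, total - a₀ - a₁, …
def pvStates : List Int → Int → List Int
  | [], _ => []
  | b :: bs, t => t :: pvStates bs (t - b)

-- B's partial sums of m starting from s: s+m₀, s+m₀+m₁, …
def pvPsums : List Int → Int → List Int
  | [], _ => []
  | b :: bs, s => (s + b) :: pvPsums bs (s + b)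

theorem pvA_fold (l : List Int) (t : Int) (acc : List Int) :
    (l.foldl (fun (st : Int × List Int) bits =>
        (st.1 - bits, st.2 ++ [2 ^ (st.1 - bits + bits - 1).toNat])) (t, acc)).2
      = acc ++ (pvStates l t).map (fun s => 2 ^ (s - 1).toNat) := by
  induction l generalizing t acc with
  | nil => simp [pvStates]
  | cons b bs ih =>
    simp only [List.foldl_cons, pvStates, List.map_cons, ih]
    simp

theorem pvB_fold (m : List Int) (s : Int) (acc : List Int) :
    (m.foldl (fun (p : Int × List Int) bits => (p.1 + bits, p.2 ++ [p.1 + bits])) (s, acc)).2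
      = acc ++ pvPsums m s := by
  induction m generalizing s acc with
  | nil => simp [pvPsums]
  | cons b bs ih =>
    simp only [List.foldl_cons, pvPsums, ih]
    simp

theorem pvPsums_append (m : List Int) (b s : Int) :
    pvPsums (m ++ [b]) s = pvPsums m s ++ [s + m.sum + b] := by
  induction m generalizing s with
  | nil => simp [pvPsums]
  | cons a m ih =>
    simp only [List.cons_append, pvPsums, ih]
    simp [add_assoc]

theorem pvPsums_rev (l : List Int) :
    (pvPsums l.reverse 0).reverse = pvStates l l.sum := by
  induction l with
  | nil => simp [pvPsums, pvStates]
  | cons a l ih =>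
    simp only [List.reverse_cons, pvPsums_append, List.reverse_append, List.reverse_cons,
      List.reverse_nil, List.nil_append, List.cons_append, ih, pvStates]
    simp [List.sum_cons, add_comm]

-- ===== VERDICT (by name: the statement is the Claim_ definition above) =====
theorem calc_overflow_table_spec : Claim_equal_calc_overflow_table := by
  intro l _ _
  unfold Spec_calc_overflow_table calc_overflow_table calc_overflow_table_alt
  simp only [pvA_fold, pvB_fold, List.nil_append, pvPsums_rev]
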